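-- pv_equiv track=rewrite | github.com/jeleff1000/yahoo_oauth | fantasy_football_data_scripts/multi_league/transformations/player/modules/scoring_calculator.py | detect_column_patterns
-- ===== SOURCE A (Python) =====
-- from typing import Dict, List, Any, Optional, Set
--
-- def detect_column_patterns(df_columns: List[str]) -> Dict[str, bool]:
--     """
--     Detect column naming patterns in DataFrame.
--
--     This helps determine which naming convention the data uses.
--
--     Args:
--         df_columns: List of column names in DataFrame
--
--     Returns:
--         Dict with pattern detection results
--     """
--     cols_lower = {c.lower() for c in df_columns}
--
--     return {
--         "has_def_prefix": any(c.startswith('def_') for c in cols_lower),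
--         "has_pass_prefix": any(c.startswith('pass_') for c in cols_lower),
--         "has_rush_prefix": any(c.startswith('rush') for c in cols_lower),
--         "has_rec_prefix": any(c.startswith('rec') for c in cols_lower),
--         "has_offensive_stats": any(s in cols_lower for s in ['passing_yards', 'rushing_yards', 'receiving_yards']),
--         "has_defensive_stats": any(s in cols_lower for s in ['def_sacks', 'def_interceptions', 'def_tds']),
--         "has_kicker_stats": any(s in cols_lower for s in ['fg_made', 'pat_made']),
--     }
-- ===== SOURCE B (Python) =====
-- _PREFIX_FLAGS = {
--     'def_': 'has_def_prefix',
--     'pass_': 'has_pass_prefix',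
--     'rush': 'has_rush_prefix',
--     'rec': 'has_rec_prefix',
-- }
--
-- _EXACT_FLAGS = {
--     'passing_yards': 'has_offensive_stats',
--     'rushing_yards': 'has_offensive_stats',
--     'receiving_yards': 'has_offensive_stats',
--     'def_sacks': 'has_defensive_stats',
--     'def_interceptions': 'has_defensive_stats',
--     'def_tds': 'has_defensive_stats',
--     'fg_made': 'has_kicker_stats',
--     'pat_made': 'has_kicker_stats',
-- }
--
-- _FLAG_NAMES = [
--     'has_def_prefix', 'has_pass_prefix', 'has_rush_prefix', 'has_rec_prefix',
--     'has_offensive_stats', 'has_defensive_stats', 'has_kicker_stats',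
-- ]
--
--
-- def detect_column_patterns(df_columns):
--     """Table-driven: hash-lookup each column's fixed-length prefixes and its full
--     name in key->flag tables, accumulating the set of triggered flag names."""
--     found = set()
--     for col in df_columns:
--         c = col.lower()
--         for n in (3, 4, 5):
--             f = _PREFIX_FLAGS.get(c[:n])
--             if f is not None:
--                 found.add(f)
--         f = _EXACT_FLAGS.get(c)
--         if f is not None:
--             found.add(f)
--     return {name: name in found for name in _FLAG_NAMES}
-- ===== Notes on version B (the rewrite author's own statement) =====
-- stated objective: alternative
-- what changed: Replaces A's seven independent any()/membership scans over a lowered set with a table-driven single pass: each column's fixed-length prefixes (3/4/5 chars) and its full lowered name are hash-looked-up in key-to-flag-name dictionaries, accumulating a set of triggered flag names from which the result dict is built.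
import Mathlib
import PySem

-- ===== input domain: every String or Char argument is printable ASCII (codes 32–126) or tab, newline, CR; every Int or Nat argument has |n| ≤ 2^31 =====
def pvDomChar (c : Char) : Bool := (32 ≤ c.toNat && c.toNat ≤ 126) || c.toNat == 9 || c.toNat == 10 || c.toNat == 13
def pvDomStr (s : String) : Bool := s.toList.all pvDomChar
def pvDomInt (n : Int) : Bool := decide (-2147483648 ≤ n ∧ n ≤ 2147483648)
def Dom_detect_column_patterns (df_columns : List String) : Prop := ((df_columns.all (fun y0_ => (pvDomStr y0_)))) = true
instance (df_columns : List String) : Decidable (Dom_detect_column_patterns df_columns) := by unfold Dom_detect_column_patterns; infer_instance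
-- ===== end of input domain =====

-- B is table-driven: one pass that hash-looks-up each column's 3/4/5-char prefixes and its
-- full lowered name in key→flag-name dictionaries, accumulating a set of triggered flag
-- names, instead of A's seven independent any()/membership scans (alternative algorithm).

-- ===== PORT A =====
def detect_column_patterns (df_columns : List String) : List (String × Bool) :=
  let cols_lower : PySem.Set String :=
    PySem.Set.ofList (df_columns.map (fun c => PySem.Str.lower c))
  [("has_def_prefix", cols_lower.any (fun c => PySem.Str.startswith c "def_")),
   ("has_pass_prefix", cols_lower.any (fun c => PySem.Str.startswith c "pass_")),
   ("has_rush_prefix", cols_lower.any (fun c => PySem.Str.startswith c "rush")),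
   ("has_rec_prefix", cols_lower.any (fun c => PySem.Str.startswith c "rec")),
   ("has_offensive_stats",
     (["passing_yards", "rushing_yards", "receiving_yards"] : List String).any
       (fun s => PySem.Set.contains cols_lower s)),
   ("has_defensive_stats",
     (["def_sacks", "def_interceptions", "def_tds"] : List String).any
       (fun s => PySem.Set.contains cols_lower s)),
   ("has_kicker_stats",
     (["fg_made", "pat_made"] : List String).any
       (fun s => PySem.Set.contains cols_lower s))]

-- ===== PORT B =====
def dcpPrefixFlags : PySem.Dict String String :=
  PySem.Dict.ofList [("def_", "has_def_prefix"), ("pass_", "has_pass_prefix"),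
    ("rush", "has_rush_prefix"), ("rec", "has_rec_prefix")]

def dcpExactFlags : PySem.Dict String String :=
  PySem.Dict.ofList [("passing_yards", "has_offensive_stats"),
    ("rushing_yards", "has_offensive_stats"), ("receiving_yards", "has_offensive_stats"),
    ("def_sacks", "has_defensive_stats"), ("def_interceptions", "has_defensive_stats"),
    ("def_tds", "has_defensive_stats"), ("fg_made", "has_kicker_stats"),
    ("pat_made", "has_kicker_stats")]

def dcpFlagNames : List String :=
  ["has_def_prefix", "has_pass_prefix", "has_rush_prefix", "has_rec_prefix",
   "has_offensive_stats", "has_defensive_stats", "has_kicker_stats"]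

-- 'if f is not None: found.add(f)'
def dcpAddOpt (found : PySem.Set String) (o : Option String) : PySem.Set String :=
  match o with
  | some f => PySem.Set.add found f
  | none => found

-- the body of B's 'for col in df_columns' loop
def dcpColStep (found : PySem.Set String) (col : String) : PySem.Set String :=
  let c := PySem.Str.lower col
  let found := ([(3 : Int), 4, 5]).foldl
    (fun fd n => dcpAddOpt fd (dcpPrefixFlags.get? (PySem.Str.slice c none (some n)))) found
  dcpAddOpt found (dcpExactFlags.get? c)

def detect_column_patterns_alt (df_columns : List String) : List (String × Bool) :=
  let found := df_columns.foldl dcpColStep PySem.Set.empty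
  dcpFlagNames.map (fun name => (name, PySem.Set.contains found name))

-- ===== PRECONDITION & SPEC =====
def Spec_detect_column_patterns (df_columns : List String) (out : List (String × Bool)) : Prop := out = detect_column_patterns_alt df_columns
instance (df_columns : List String) (out : List (String × Bool)) : Decidable (Spec_detect_column_patterns df_columns out) := by unfold Spec_detect_column_patterns; infer_instance

-- ===== CLAIM (what is proved, stated in full; the proofs are below) =====
def Claim_equal_detect_column_patterns : Prop := ∀ (df_columns : List String), Dom_detect_column_patterns df_columns → Spec_detect_column_patterns df_columns (detect_column_patterns df_columns)

-- ===== LEMMAS AND PROOFS =====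

-- A-side: any over the lowered set = any over the original list of the composed test
theorem any_ofList_map {α β : Type} [BEq β] [LawfulBEq β]
    (xs : List α) (f : α → β) (p : β → Bool) :
    (PySem.Set.ofList (xs.map f)).any p = xs.any (fun x => p (f x)) := by
  rw [Bool.eq_iff_iff]
  simp only [List.any_eq_true]
  constructor
  · rintro ⟨b, hb, hp⟩
    rcases List.mem_map.mp ((PySem.Set.mem_ofList _ _).mp hb) with ⟨x, hx, rfl⟩
    exact ⟨x, hx, hp⟩
  · rintro ⟨x, hx, hp⟩
    exact ⟨f x, (PySem.Set.mem_ofList _ _).mpr (List.mem_map.mpr ⟨x, hx, rfl⟩), hp⟩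

-- A-side: 'any(s in set(map f xs) for s in ss)' = one pass over xs testing f x
theorem any_contains_ofList_map {α β : Type} [BEq β] [LawfulBEq β]
    (xs : List α) (f : α → β) (ss : List β) :
    ss.any (fun s => PySem.Set.contains (PySem.Set.ofList (xs.map f)) s)
      = xs.any (fun x => ss.any (fun s => f x == s)) := by
  rw [Bool.eq_iff_iff]
  simp only [List.any_eq_true]
  constructor
  · rintro ⟨s, hs, hc⟩
    rcases List.mem_map.mp ((PySem.Set.mem_ofList _ _).mp ((PySem.Set.contains_iff _ _).mp hc)) with
      ⟨x, hx, hxe⟩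
    exact ⟨x, hx, s, hs, by simp [hxe]⟩
  · rintro ⟨x, hx, s, hs, he⟩
    refine ⟨s, hs, (PySem.Set.contains_iff _ _).mpr ?_⟩
    exact (PySem.Set.mem_ofList _ _).mpr (List.mem_map.mpr ⟨x, hx, eq_of_beq he⟩)

-- B-side: which flag names a single column triggers
def dcpTrig (col x : String) : Prop :=
  dcpPrefixFlags.get? (PySem.Str.slice (PySem.Str.lower col) none (some 3)) = some x ∨
  dcpPrefixFlags.get? (PySem.Str.slice (PySem.Str.lower col) none (some 4)) = some x ∨
  dcpPrefixFlags.get? (PySem.Str.slice (PySem.Str.lower col) none (some 5)) = some x ∨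
  dcpExactFlags.get? (PySem.Str.lower col) = some x

theorem mem_dcpAddOpt (s : PySem.Set String) (o : Option String) (x : String) :
    x ∈ dcpAddOpt s o ↔ x ∈ s ∨ o = some x := by
  cases o with
  | none => simp [dcpAddOpt]
  | some f => simp [dcpAddOpt, PySem.Set.mem_add, eq_comm]

theorem mem_dcpColStep (s : PySem.Set String) (col x : String) :
    x ∈ dcpColStep s col ↔ x ∈ s ∨ dcpTrig col x := by
  simp only [dcpColStep, dcpTrig, List.foldl_cons, List.foldl_nil, mem_dcpAddOpt, or_assoc]

theorem mem_foldl_dcpColStep (l : List String) (s : PySem.Set String) (x : String) :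
    x ∈ l.foldl dcpColStep s ↔ x ∈ s ∨ ∃ col ∈ l, dcpTrig col x := by
  induction l generalizing s with
  | nil => simp
  | cons h t ih =>
    rw [List.foldl_cons, ih, mem_dcpColStep]
    simp only [List.mem_cons]
    constructor
    · rintro ((hs | htrig) | ⟨c, hc, htr⟩)
      · exact Or.inl hs
      · exact Or.inr ⟨h, Or.inl rfl, htrig⟩
      · exact Or.inr ⟨c, Or.inr hc, htr⟩
    · rintro (hs | ⟨c, (rfl | hc), htr⟩)
      · exact Or.inl (Or.inl hs)
      · exact Or.inl (Or.inr htr)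
      · exact Or.inr ⟨c, hc, htr⟩

-- lookup characterizations of the two literal tables
theorem get?_prefixFlags (s : String) :
    dcpPrefixFlags.get? s =
      if s = "def_" then some "has_def_prefix" else if s = "pass_" then some "has_pass_prefix"
      else if s = "rush" then some "has_rush_prefix" else if s = "rec" then some "has_rec_prefix"
      else none := by
  have h : dcpPrefixFlags = PySem.Dict.mk [("def_", "has_def_prefix"),
      ("pass_", "has_pass_prefix"), ("rush", "has_rush_prefix"), ("rec", "has_rec_prefix")] := by
    decide
  rw [h]
  by_cases h1 : s = "def_"
  · subst h1; decide
  by_cases h2 : s = "pass_"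
  · subst h2; decide
  by_cases h3 : s = "rush"
  · subst h3; decide
  by_cases h4 : s = "rec"
  · subst h4; decide
  simp [Ne.symm h1, Ne.symm h2, Ne.symm h3, Ne.symm h4, h1, h2, h3, h4, PySem.Dict.get?]

theorem get?_exactFlags (s : String) :
    dcpExactFlags.get? s =
      if s = "passing_yards" ∨ s = "rushing_yards" ∨ s = "receiving_yards" then
        some "has_offensive_stats"
      else if s = "def_sacks" ∨ s = "def_interceptions" ∨ s = "def_tds" then
        some "has_defensive_stats"
      else if s = "fg_made" ∨ s = "pat_made" then some "has_kicker_stats"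
      else none := by
  have h : dcpExactFlags = PySem.Dict.mk [("passing_yards", "has_offensive_stats"),
      ("rushing_yards", "has_offensive_stats"), ("receiving_yards", "has_offensive_stats"),
      ("def_sacks", "has_defensive_stats"), ("def_interceptions", "has_defensive_stats"),
      ("def_tds", "has_defensive_stats"), ("fg_made", "has_kicker_stats"),
      ("pat_made", "has_kicker_stats")] := by decide
  rw [h]
  by_cases e1 : s = "passing_yards"
  · subst e1; decide
  by_cases e2 : s = "rushing_yards"
  · subst e2; decide
  by_cases e3 : s = "receiving_yards"
  · subst e3; decide
  by_cases e4 : s = "def_sacks"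
  · subst e4; decide
  by_cases e5 : s = "def_interceptions"
  · subst e5; decide
  by_cases e6 : s = "def_tds"
  · subst e6; decide
  by_cases e7 : s = "fg_made"
  · subst e7; decide
  by_cases e8 : s = "pat_made"
  · subst e8; decide
  simp [Ne.symm e1, Ne.symm e2, Ne.symm e3, Ne.symm e4, Ne.symm e5, Ne.symm e6, Ne.symm e7,
    Ne.symm e8, e1, e2, e3, e4, e5, e6, e7, e8, PySem.Dict.get?]

-- which key the prefix table maps to each flag name
theorem lookupP_def (s : String) :
    dcpPrefixFlags.get? s = some "has_def_prefix" ↔ s = "def_" := by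
  rw [get?_prefixFlags]; split_ifs with h1 h2 h3 h4 <;> simp [*]

theorem lookupP_pass (s : String) :
    dcpPrefixFlags.get? s = some "has_pass_prefix" ↔ s = "pass_" := by
  rw [get?_prefixFlags]; split_ifs with h1 h2 h3 h4 <;> simp [*]

theorem lookupP_rush (s : String) :
    dcpPrefixFlags.get? s = some "has_rush_prefix" ↔ s = "rush" := by
  rw [get?_prefixFlags]; split_ifs with h1 h2 h3 h4 <;> simp [*]

theorem lookupP_rec (s : String) :
    dcpPrefixFlags.get? s = some "has_rec_prefix" ↔ s = "rec" := by
  rw [get?_prefixFlags]; split_ifs with h1 h2 h3 h4 <;> simp [*]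

theorem lookupP_ne_exact (s f : String) (hf : f = "has_offensive_stats" ∨
    f = "has_defensive_stats" ∨ f = "has_kicker_stats") :
    dcpPrefixFlags.get? s ≠ some f := by
  rw [get?_prefixFlags]
  rcases hf with rfl | rfl | rfl <;> split_ifs <;> simp

theorem lookupE_ne_prefix (s f : String) (hf : f = "has_def_prefix" ∨ f = "has_pass_prefix" ∨
    f = "has_rush_prefix" ∨ f = "has_rec_prefix") :
    dcpExactFlags.get? s ≠ some f := by
  rw [get?_exactFlags]
  rcases hf with rfl | rfl | rfl | rfl <;> split_ifs <;> simp

theorem lookupE_off (s : String) :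
    dcpExactFlags.get? s = some "has_offensive_stats" ↔
      (s = "passing_yards" ∨ s = "rushing_yards" ∨ s = "receiving_yards") := by
  rw [get?_exactFlags]; split_ifs with h1 h2 h3 <;> simp [*]

theorem lookupE_dst (s : String) :
    dcpExactFlags.get? s = some "has_defensive_stats" ↔
      (s = "def_sacks" ∨ s = "def_interceptions" ∨ s = "def_tds") := by
  rw [get?_exactFlags]; split_ifs with h1 h2 h3
  · obtain rfl | rfl | rfl := h1 <;> simp
  · simp [h2]
  · obtain rfl | rfl := h3 <;> simp
  · simp [h2]

theorem lookupE_kick (s : String) :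
    dcpExactFlags.get? s = some "has_kicker_stats" ↔ (s = "fg_made" ∨ s = "pat_made") := by
  rw [get?_exactFlags]; split_ifs with h1 h2 h3
  · obtain rfl | rfl | rfl := h1 <;> simp
  · obtain rfl | rfl | rfl := h2 <;> simp
  · simp [h3]
  · simp [h3]

-- c[:n] == t (a string of length n) is startswith(c, t)
theorem slice_eq_iff_startswith (c t : String) (n : Nat)
    (hlen : t.toList.length = n) :
    PySem.Str.slice c none (some (n : Int)) = t ↔ PySem.Str.startswith c t = true := by
  rw [String.ext_iff, PySem.Str.toList_slice, PySem.Chars.slice_eq_listSlice,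
    PySem.List.slice_to_natCast, PySem.Str.startswith_eq, PySem.Chars.startswith_iff,
    List.prefix_iff_eq_take, ← hlen]
  constructor
  · intro h; rw [← h]; simp
  · intro h; rw [h]; simp

-- c[:m] = t forces c[:n] = t for length t ≤ n ≤ m
theorem slice_eq_of_slice_eq (c t : String) (n m : Nat)
    (hm : PySem.Str.slice c none (some (m : Int)) = t)
    (hlen : t.toList.length ≤ n) (hnm : n ≤ m) :
    PySem.Str.slice c none (some (n : Int)) = t := by
  rw [String.ext_iff, PySem.Str.toList_slice, PySem.Chars.slice_eq_listSlice,
    PySem.List.slice_to_natCast] at *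
  have h1 : List.take n c.toList = List.take n (List.take m c.toList) := by
    rw [List.take_take]; congr 1; omega
  rw [h1, hm]; exact List.take_of_length_le hlen

-- c[:n] = t is impossible when t is longer than n
theorem slice_ne_of_long (c t : String) (n : Nat) (hlen : n < t.toList.length) :
    PySem.Str.slice c none (some (n : Int)) ≠ t := by
  intro h
  rw [String.ext_iff, PySem.Str.toList_slice, PySem.Chars.slice_eq_listSlice,
    PySem.List.slice_to_natCast] at h
  have := congrArg List.length h
  rw [List.length_take] at this
  omega

theorem trig_def (col : String) :
    dcpTrig col "has_def_prefix" ↔ PySem.Str.startswith (PySem.Str.lower col) "def_" = true := by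
  unfold dcpTrig
  rw [lookupP_def, lookupP_def, lookupP_def]
  constructor
  · rintro (h3 | h4 | h5 | hx)
    · exact absurd h3 (slice_ne_of_long _ _ 3 (by decide))
    · exact (slice_eq_iff_startswith _ _ 4 (by decide)).mp h4
    · exact (slice_eq_iff_startswith _ _ 4 (by decide)).mp
        (slice_eq_of_slice_eq _ _ 4 5 h5 (by decide) (by decide))
    · exact absurd hx (lookupE_ne_prefix _ _ (Or.inl rfl))
  · intro h
    exact Or.inr (Or.inl ((slice_eq_iff_startswith _ _ 4 (by decide)).mpr h))

theorem trig_pass (col : String) :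
    dcpTrig col "has_pass_prefix" ↔
      PySem.Str.startswith (PySem.Str.lower col) "pass_" = true := by
  unfold dcpTrig
  rw [lookupP_pass, lookupP_pass, lookupP_pass]
  constructor
  · rintro (h3 | h4 | h5 | hx)
    · exact absurd h3 (slice_ne_of_long _ _ 3 (by decide))
    · exact absurd h4 (slice_ne_of_long _ _ 4 (by decide))
    · exact (slice_eq_iff_startswith _ _ 5 (by decide)).mp h5
    · exact absurd hx (lookupE_ne_prefix _ _ (Or.inr (Or.inl rfl)))
  · intro h
    exact Or.inr (Or.inr (Or.inl ((slice_eq_iff_startswith _ _ 5 (by decide)).mpr h)))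

theorem trig_rush (col : String) :
    dcpTrig col "has_rush_prefix" ↔
      PySem.Str.startswith (PySem.Str.lower col) "rush" = true := by
  unfold dcpTrig
  rw [lookupP_rush, lookupP_rush, lookupP_rush]
  constructor
  · rintro (h3 | h4 | h5 | hx)
    · exact absurd h3 (slice_ne_of_long _ _ 3 (by decide))
    · exact (slice_eq_iff_startswith _ _ 4 (by decide)).mp h4
    · exact (slice_eq_iff_startswith _ _ 4 (by decide)).mp
        (slice_eq_of_slice_eq _ _ 4 5 h5 (by decide) (by decide))
    · exact absurd hx (lookupE_ne_prefix _ _ (Or.inr (Or.inr (Or.inl rfl))))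
  · intro h
    exact Or.inr (Or.inl ((slice_eq_iff_startswith _ _ 4 (by decide)).mpr h))

theorem trig_rec (col : String) :
    dcpTrig col "has_rec_prefix" ↔ PySem.Str.startswith (PySem.Str.lower col) "rec" = true := by
  unfold dcpTrig
  rw [lookupP_rec, lookupP_rec, lookupP_rec]
  constructor
  · rintro (h3 | h4 | h5 | hx)
    · exact (slice_eq_iff_startswith _ _ 3 (by decide)).mp h3
    · exact (slice_eq_iff_startswith _ _ 3 (by decide)).mp
        (slice_eq_of_slice_eq _ _ 3 4 h4 (by decide) (by decide))
    · exact (slice_eq_iff_startswith _ _ 3 (by decide)).mp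
        (slice_eq_of_slice_eq _ _ 3 5 h5 (by decide) (by decide))
    · exact absurd hx (lookupE_ne_prefix _ _ (Or.inr (Or.inr (Or.inr rfl))))
  · intro h
    exact Or.inl ((slice_eq_iff_startswith _ _ 3 (by decide)).mpr h)

theorem trig_off (col : String) :
    dcpTrig col "has_offensive_stats" ↔
      (PySem.Str.lower col = "passing_yards" ∨ PySem.Str.lower col = "rushing_yards" ∨
        PySem.Str.lower col = "receiving_yards") := by
  unfold dcpTrig
  rw [lookupE_off]
  have hP : ∀ s, dcpPrefixFlags.get? s ≠ some "has_offensive_stats" :=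
    fun s => lookupP_ne_exact s _ (Or.inl rfl)
  simp [hP _]

theorem trig_dst (col : String) :
    dcpTrig col "has_defensive_stats" ↔
      (PySem.Str.lower col = "def_sacks" ∨ PySem.Str.lower col = "def_interceptions" ∨
        PySem.Str.lower col = "def_tds") := by
  unfold dcpTrig
  rw [lookupE_dst]
  have hP : ∀ s, dcpPrefixFlags.get? s ≠ some "has_defensive_stats" :=
    fun s => lookupP_ne_exact s _ (Or.inr (Or.inl rfl))
  simp [hP _]

theorem trig_kick (col : String) :
    dcpTrig col "has_kicker_stats" ↔
      (PySem.Str.lower col = "fg_made" ∨ PySem.Str.lower col = "pat_made") := by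
  unfold dcpTrig
  rw [lookupE_kick]
  have hP : ∀ s, dcpPrefixFlags.get? s ≠ some "has_kicker_stats" :=
    fun s => lookupP_ne_exact s _ (Or.inr (Or.inr rfl))
  simp [hP _]

-- B's accumulated flag = the corresponding scan over the columns
theorem contains_found (df : List String) (name : String) (p : String → Bool)
    (hp : ∀ col, dcpTrig col name ↔ p (PySem.Str.lower col) = true) :
    PySem.Set.contains (df.foldl dcpColStep PySem.Set.empty) name
      = df.any (fun x => p (PySem.Str.lower x)) := by
  rw [Bool.eq_iff_iff, PySem.Set.contains_iff, mem_foldl_dcpColStep]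
  simp only [List.any_eq_true, hp]
  simp [PySem.Set.empty]

-- ===== VERDICT (by name: the statement is the Claim_ definition above) =====
theorem detect_column_patterns_spec : Claim_equal_detect_column_patterns := by
  intro df _
  unfold Spec_detect_column_patterns detect_column_patterns detect_column_patterns_alt
  simp only [dcpFlagNames, List.map, any_ofList_map, any_contains_ofList_map]
  rw [contains_found df _ (fun c => PySem.Str.startswith c "def_") trig_def,
    contains_found df _ (fun c => PySem.Str.startswith c "pass_") trig_pass,
    contains_found df _ (fun c => PySem.Str.startswith c "rush") trig_rush,
    contains_found df _ (fun c => PySem.Str.startswith c "rec") trig_rec,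
    contains_found df _ (fun c => c == "passing_yards" || c == "rushing_yards" ||
      c == "receiving_yards") (by intro col; rw [trig_off]; simp [Bool.or_assoc]),
    contains_found df _ (fun c => c == "def_sacks" || c == "def_interceptions" ||
      c == "def_tds") (by intro col; rw [trig_dst]; simp [Bool.or_assoc]),
    contains_found df _ (fun c => c == "fg_made" || c == "pat_made")
      (by intro col; rw [trig_kick]; simp)]
  simp [Bool.or_assoc]
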